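-- pv_equiv track=rewrite | github.com/stefanutti/maps-coloring-python | python-tests/search_in_lists_of_tuples.py | checkIfOneEdgeConnected
-- ===== SOURCE A (Python) =====
-- def rotate (l, n):
--     return l[n:] + l[:n]
--
-- def checkIfOneEdgeConnected (face):
--
--     # Return variable
--     #
--     isOneEdgeConnectedGraph = False
--
--     # Search the list [(),(),...,()]
--     #
--     iEdge = 0
--     while isOneEdgeConnectedGraph == False and iEdge < len(face):
--         reverseEdge = rotate(face[iEdge], 1)
--
--         # Start the search
--         #
--         if reverseEdge in face[iEdge + 1:]:
--             isOneEdgeConnectedGraph = True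
--         else:
--
--             # Move to the next edge
--             #
--             iEdge = iEdge + 1
--
--     # Return
--     #
--     return isOneEdgeConnectedGraph
-- ===== SOURCE B (Python) =====
-- def checkIfOneEdgeConnected(face):
--     # Index join: first build a positional index (each edge -> its last position),
--     # then check whether some edge's rotation occurs at a strictly later position.
--     last = {}
--     for i, e in enumerate(face):
--         last[tuple(e)] = i
--     return any(last.get(tuple(e[1:] + e[:1]), -1) > i for i, e in enumerate(face))
-- ===== Notes on version B (the rewrite author's own statement) =====
-- stated objective: alternative
-- what changed: Replaces A's per-edge linear rescan of the remaining tail with an index join: one pass builds a dict mapping each edge to its last position, a second pass checks whether any edge's rotation has a strictly later recorded position.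
import Mathlib
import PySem

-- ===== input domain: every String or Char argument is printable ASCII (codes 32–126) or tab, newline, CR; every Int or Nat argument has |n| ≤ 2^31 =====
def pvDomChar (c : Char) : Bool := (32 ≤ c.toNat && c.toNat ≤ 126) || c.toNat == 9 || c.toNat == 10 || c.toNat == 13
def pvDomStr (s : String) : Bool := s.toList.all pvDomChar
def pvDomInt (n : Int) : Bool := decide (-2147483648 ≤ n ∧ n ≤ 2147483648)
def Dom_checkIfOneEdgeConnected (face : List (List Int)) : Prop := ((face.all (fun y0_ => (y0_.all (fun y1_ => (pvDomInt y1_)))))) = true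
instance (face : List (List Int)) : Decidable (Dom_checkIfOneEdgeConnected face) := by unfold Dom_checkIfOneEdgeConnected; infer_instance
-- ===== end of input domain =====

-- ===== PORT A =====
-- B replaces A's per-edge rescan of the tail with a last-position index join; return values proved equal.
-- rotate(l, n) = l[n:] + l[:n]
def pvRotate (l : List Int) (n : Int) : List Int :=
  PySem.List.slice l (some n) none ++ PySem.List.slice l none (some n)

-- A's while loop: iEdge advances ↔ recurse on the tail; face[iEdge + 1:] is that tail
def pvAWhile : List (List Int) → Bool
  | [] => false
  | e :: rest => if (pvRotate e 1) ∈ rest then true else pvAWhile rest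

def checkIfOneEdgeConnected (face : List (List Int)) : Bool := pvAWhile face

-- ===== PORT B =====
-- tuple(e[1:] + e[:1])
def pvRot1 (e : List Int) : List Int :=
  PySem.List.slice e (some 1) none ++ PySem.List.slice e none (some 1)

-- first pass: last[tuple(e)] = i for i, e in enumerate(face)
def pvLastIdx (face : List (List Int)) : PySem.Dict (List Int) Int :=
  (PySem.List.enumerate face).foldl (fun d p => d.insert p.2 p.1) PySem.Dict.empty

-- second pass: any(last.get(tuple(e[1:] + e[:1]), -1) > i for i, e in enumerate(face))
def checkIfOneEdgeConnected_alt (face : List (List Int)) : Bool :=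
  (PySem.List.enumerate face).any
    (fun p => decide ((pvLastIdx face).getD (pvRot1 p.2) (-1) > p.1))

-- ===== PRECONDITION & SPEC =====
def Spec_checkIfOneEdgeConnected (face : List (List Int)) (out : Bool) : Prop := out = checkIfOneEdgeConnected_alt face
instance (face : List (List Int)) (out : Bool) : Decidable (Spec_checkIfOneEdgeConnected face out) := by unfold Spec_checkIfOneEdgeConnected; infer_instance

-- ===== CLAIM (what is proved, stated in full; the proofs are below) =====
def Claim_equal_checkIfOneEdgeConnected : Prop := ∀ (face : List (List Int)), Dom_checkIfOneEdgeConnected face → Spec_checkIfOneEdgeConnected face (checkIfOneEdgeConnected face)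

-- ===== LEMMAS AND PROOFS =====

-- index of the LAST occurrence of k in l (none if absent)
def pvLi (k : List Int) : List (List Int) → Option Nat
  | [] => none
  | e :: r =>
    match pvLi k r with
    | some j => some (j + 1)
    | none => if e = k then some 0 else none

theorem pvLi_get (k : List Int) (l : List (List Int)) (j : Nat)
    (h : pvLi k l = some j) : l[j]? = some k := by
  induction l generalizing j with
  | nil => simp [pvLi] at h
  | cons e r ih =>
    simp only [pvLi] at h
    cases hr : pvLi k r with
    | some j' =>
      rw [hr] at h
      cases h
      simpa using ih j' hr
    | none =>
      rw [hr] at h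
      by_cases he : e = k
      · simp [he] at h; subst he; cases h; simp
      · simp [he] at h

theorem pvLi_last (k : List Int) (l : List (List Int)) (j' : Nat)
    (h : l[j']? = some k) : ∃ j, j' ≤ j ∧ pvLi k l = some j := by
  induction l generalizing j' with
  | nil => simp at h
  | cons e r ih =>
    cases j' with
    | zero =>
      simp at h
      cases hr : pvLi k r with
      | some j => exact ⟨j + 1, by omega, by simp [pvLi, hr]⟩
      | none => exact ⟨0, le_rfl, by simp [pvLi, hr, h]⟩
    | succ j'' =>
      simp only [List.getElem?_cons_succ] at h
      obtain ⟨j, hle, hli⟩ := ih j'' h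
      exact ⟨j + 1, by omega, by simp [pvLi, hli]⟩

theorem pvFold_getD (k : List Int) (l : List (List Int)) :
    ∀ (s : Int) (d : PySem.Dict (List Int) Int),
    ((PySem.List.enumerate l s).foldl (fun d p => d.insert p.2 p.1) d).getD k (-1)
      = (match pvLi k l with
         | some j => s + (j : Int)
         | none => d.getD k (-1)) := by
  induction l with
  | nil => intro s d; simp [PySem.List.enumerate_nil, pvLi]
  | cons e r ih =>
    intro s d
    rw [PySem.List.enumerate_cons]
    simp only [List.foldl_cons]
    rw [ih]
    cases hr : pvLi k r with
    | some j => simp [pvLi, hr]; ring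
    | none =>
      by_cases he : e = k
      · subst he
        simp [pvLi, hr, PySem.Dict.getD_insert_self]
      · simp [pvLi, hr, he, PySem.Dict.getD_insert_of_ne d s (-1) (Ne.symm he)]

theorem pvLastIdx_gt (face : List (List Int)) (k : List Int) (i : Nat) :
    ((pvLastIdx face).getD k (-1) > (i : Int)) ↔ ∃ j : Nat, i < j ∧ face[j]? = some k := by
  unfold pvLastIdx
  rw [pvFold_getD]
  cases hli : pvLi k face with
  | some j =>
    simp only [zero_add]
    constructor
    · intro h
      exact ⟨j, by exact_mod_cast h, pvLi_get k face j hli⟩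
    · rintro ⟨j', hij', hj'⟩
      obtain ⟨j2, hle, hli2⟩ := pvLi_last k face j' hj'
      rw [hli] at hli2
      cases hli2
      exact_mod_cast lt_of_lt_of_le hij' hle
  | none =>
    simp only
    constructor
    · intro h
      exfalso
      have : ((PySem.Dict.empty : PySem.Dict (List Int) Int).getD k (-1)) = -1 := rfl
      rw [this] at h
      omega
    · rintro ⟨j, _, hj⟩
      obtain ⟨j2, _, hli2⟩ := pvLi_last k face j hj
      rw [hli] at hli2
      exact absurd hli2 (by simp)

theorem pvAWhile_iff (l : List (List Int)) :
    pvAWhile l = true ↔ ∃ (i j : Nat) (a : List Int),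
      i < j ∧ l[i]? = some a ∧ l[j]? = some (pvRotate a 1) := by
  induction l with
  | nil => simp [pvAWhile]
  | cons e r ih =>
    simp only [pvAWhile]
    by_cases hm : pvRotate e 1 ∈ r
    · simp only [hm, if_true, true_iff]
      obtain ⟨j', hj'⟩ := List.mem_iff_getElem?.mp hm
      exact ⟨0, j' + 1, e, by omega, by simp, by simpa using hj'⟩
    · simp only [hm, if_false, ih]
      constructor
      · rintro ⟨i, j, a, hij, hi, hj⟩
        exact ⟨i + 1, j + 1, a, by omega, by simpa using hi, by simpa using hj⟩
      · rintro ⟨i, j, a, hij, hi, hj⟩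
        cases i with
        | zero =>
          simp at hi
          subst hi
          cases j with
          | zero => omega
          | succ j' =>
            exact absurd (List.mem_iff_getElem?.mpr ⟨j', by simpa using hj⟩) hm
        | succ i' =>
          cases j with
          | zero => omega
          | succ j' =>
            exact ⟨i', j', a, by omega, by simpa using hi, by simpa using hj⟩

theorem pvAlt_iff (face : List (List Int)) :
    checkIfOneEdgeConnected_alt face = true ↔ ∃ (i j : Nat) (a : List Int),
      i < j ∧ face[i]? = some a ∧ face[j]? = some (pvRotate a 1) := by
  unfold checkIfOneEdgeConnected_alt
  rw [List.any_eq_true]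
  constructor
  · rintro ⟨p, hp, hgt⟩
    obtain ⟨i, hi, rfl⟩ := (PySem.List.mem_enumerate_iff _ _ _).mp hp
    simp only [decide_eq_true_eq, zero_add] at hgt
    obtain ⟨j, hij, hj⟩ := (pvLastIdx_gt face _ i).mp hgt
    exact ⟨i, j, face[i], hij, by simp [hi], hj⟩
  · rintro ⟨i, j, a, hij, hi, hj⟩
    have hilen : i < face.length := (List.getElem?_eq_some_iff.mp hi).1
    have hia : face[i] = a := by
      obtain ⟨_, h2⟩ := List.getElem?_eq_some_iff.mp hi; exact h2
    refine ⟨((i : Int), face[i]), (PySem.List.mem_enumerate_iff _ _ _).mpr ⟨i, hilen, by simp⟩, ?_⟩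
    simp only [decide_eq_true_eq]
    refine (pvLastIdx_gt face _ i).mpr ⟨j, hij, ?_⟩
    have : pvRot1 face[i] = pvRotate a 1 := by rw [hia]; rfl
    rw [this]; exact hj

-- ===== VERDICT (by name: the statement is the Claim_ definition above) =====
theorem checkIfOneEdgeConnected_spec : Claim_equal_checkIfOneEdgeConnected := by
  intro face _
  unfold Spec_checkIfOneEdgeConnected
  rw [Bool.eq_iff_iff]
  rw [show checkIfOneEdgeConnected face = pvAWhile face from rfl]
  rw [pvAWhile_iff, pvAlt_iff]
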